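-- pv_equiv track=rewrite | github.com/aws-samples/sample-bedrock-migration-and-modernization-tools | bedrock-model-profiler/ui/model_details_modal.py | group_pricing_by_geography_for_type
-- ===== SOURCE A (Python) =====
-- from typing import Dict, Any, List
--
-- def group_pricing_by_geography_for_type(type_regions: Dict[str, List[Dict[str, Any]]]) -> Dict[str, Dict[str, List[Dict[str, Any]]]]:
--     """Group pricing regions by geographical areas for a specific pricing type"""
--     geo_groups = {
--         'North America': {},
--         'Europe': {},
--         'Asia Pacific': {},
--         'South America': {},
--         'Other Regions': {}
--     }
--
--     for region, pricing_items in type_regions.items():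
--         geo_region = map_region_to_geography(region)
--         geo_groups[geo_region][region] = pricing_items
--
--     # Remove empty groups
--     return {k: v for k, v in geo_groups.items() if v}
--
-- def map_region_to_geography(region: str) -> str:
--     """Map AWS region to geographical area"""
--     if region.startswith('us-') or region.startswith('ca-'):
--         return 'North America'
--     elif region.startswith('eu-'):
--         return 'Europe'
--     elif region.startswith('ap-'):
--         return 'Asia Pacific'
--     elif region.startswith('sa-'):
--         return 'South America'
--     else:
--         return 'Other Regions'
-- ===== SOURCE B (Python) =====
-- _GEOGRAPHIES = ['North America', 'Europe', 'Asia Pacific', 'South America', 'Other Regions']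
--
-- _PREFIX_TO_GEOGRAPHY = {
--     'us-': 'North America',
--     'ca-': 'North America',
--     'eu-': 'Europe',
--     'ap-': 'Asia Pacific',
--     'sa-': 'South America',
-- }
--
-- def _geography_of(region):
--     return _PREFIX_TO_GEOGRAPHY.get(region[:3], 'Other Regions')
--
-- def group_pricing_by_geography_for_type(type_regions):
--     grouped = {}
--     for geography in _GEOGRAPHIES:
--         bucket = {region: items for region, items in type_regions.items()
--                   if _geography_of(region) == geography}
--         if bucket:
--             grouped[geography] = bucket
--     return grouped
-- ===== Notes on version B (the rewrite author's own statement) =====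
-- stated objective: alternative
-- what changed: Replaces the region-by-region assignment into a pre-built table of five geography dicts with a geography-outer loop: for each geography in canonical order a bucket is built by a filtering dict comprehension (region classified by a 3-character-prefix table lookup instead of a startswith if/elif chain) and appended only if non-empty.
import Mathlib
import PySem

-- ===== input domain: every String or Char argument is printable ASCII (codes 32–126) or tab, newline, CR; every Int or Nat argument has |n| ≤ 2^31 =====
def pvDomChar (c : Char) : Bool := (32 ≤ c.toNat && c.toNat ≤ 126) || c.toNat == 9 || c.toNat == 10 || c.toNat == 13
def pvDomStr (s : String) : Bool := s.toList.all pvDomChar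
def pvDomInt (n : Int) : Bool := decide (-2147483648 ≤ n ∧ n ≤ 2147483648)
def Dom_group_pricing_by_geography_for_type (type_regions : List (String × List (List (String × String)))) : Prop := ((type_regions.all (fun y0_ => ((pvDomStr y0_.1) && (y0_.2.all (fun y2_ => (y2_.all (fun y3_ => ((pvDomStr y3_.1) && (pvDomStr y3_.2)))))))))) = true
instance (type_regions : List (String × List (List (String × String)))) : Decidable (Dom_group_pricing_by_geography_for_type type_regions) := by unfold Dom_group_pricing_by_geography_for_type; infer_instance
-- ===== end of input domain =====

-- B groups geography-outer: for each geography in canonical order it builds the bucket by a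
-- filtering dict comprehension, classifying a region by a 3-char-prefix table lookup instead of
-- A's startswith if/elif chain and region-by-region assignment into pre-built groups (objective: alternative).


-- ===== PORT A =====
-- map_region_to_geography: the startswith if/elif chain
def map_region_to_geography (region : String) : String :=
  if PySem.Str.startswith region "us-" || PySem.Str.startswith region "ca-" then "North America"
  else if PySem.Str.startswith region "eu-" then "Europe"
  else if PySem.Str.startswith region "ap-" then "Asia Pacific"
  else if PySem.Str.startswith region "sa-" then "South America"
  else "Other Regions"

def group_pricing_by_geography_for_type (type_regions : List (String × List (List (String × String)))) : List (String × List (String × List (List (String × String)))) :=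
  -- geo_groups = {...five empty dicts...}
  let geo0 : PySem.Dict String (PySem.Dict String (List (List (String × String)))) :=
    PySem.Dict.mk [("North America", PySem.Dict.mk []), ("Europe", PySem.Dict.mk []),
                   ("Asia Pacific", PySem.Dict.mk []), ("South America", PySem.Dict.mk []),
                   ("Other Regions", PySem.Dict.mk [])]
  -- for region, pricing_items in type_regions.items(): geo_groups[geo_region][region] = pricing_items
  -- (geo_groups[geo_region] always exists, so 'modify' with a dummy default is exact here)
  let geoGroups := type_regions.foldl
    (fun g p => g.modify (map_region_to_geography p.1) (PySem.Dict.mk [])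
      (fun inner => inner.insert p.1 p.2)) geo0
  -- {k: v for k, v in geo_groups.items() if v}
  (geoGroups.items.filter (fun kv => !kv.2.items.isEmpty)).map (fun kv => (kv.1, kv.2.items))

-- ===== PORT B =====
def pvGeographies : List String :=
  ["North America", "Europe", "Asia Pacific", "South America", "Other Regions"]

def pvPrefixToGeography : PySem.Dict String String :=
  PySem.Dict.mk [("us-", "North America"), ("ca-", "North America"), ("eu-", "Europe"),
                 ("ap-", "Asia Pacific"), ("sa-", "South America")]

-- _geography_of: _PREFIX_TO_GEOGRAPHY.get(region[:3], 'Other Regions')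
def geography_of (region : String) : String :=
  pvPrefixToGeography.getD (PySem.Str.slice region none (some 3)) "Other Regions"

def group_pricing_by_geography_for_type_alt (type_regions : List (String × List (List (String × String)))) : List (String × List (String × List (List (String × String)))) :=
  pvGeographies.foldl (fun grouped geography =>
    -- bucket = {region: items for region, items in type_regions.items() if _geography_of(region) == geography}
    let bucket : PySem.Dict String (List (List (String × String))) :=
      type_regions.foldl (fun d p => if geography_of p.1 == geography then d.insert p.1 p.2 else d)
        (PySem.Dict.mk [])
    if bucket.items.isEmpty then grouped else grouped ++ [(geography, bucket.items)]) []

-- ===== PRECONDITION & SPEC =====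
def Spec_group_pricing_by_geography_for_type (type_regions : List (String × List (List (String × String)))) (out : List (String × List (String × List (List (String × String))))) : Prop := out = group_pricing_by_geography_for_type_alt type_regions
instance (type_regions : List (String × List (List (String × String)))) (out : List (String × List (String × List (List (String × String))))) : Decidable (Spec_group_pricing_by_geography_for_type type_regions out) := by
  unfold Spec_group_pricing_by_geography_for_type
  letI d1 : DecidableEq (List (String × String)) := inferInstance
  letI d2 : DecidableEq (List (List (String × String))) := inferInstance
  letI d3 : DecidableEq (String × List (List (String × String))) := inferInstance
  letI d4 : DecidableEq (List (String × List (List (String × String)))) := inferInstance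
  letI d5 : DecidableEq (String × List (String × List (List (String × String)))) := inferInstance
  letI d6 : DecidableEq (List (String × List (String × List (List (String × String))))) := inferInstance
  infer_instance

-- ===== CLAIM (what is proved, stated in full; the proofs are below) =====
def Claim_equal_group_pricing_by_geography_for_type : Prop := ∀ (type_regions : List (String × List (List (String × String)))), Dom_group_pricing_by_geography_for_type type_regions → Spec_group_pricing_by_geography_for_type type_regions (group_pricing_by_geography_for_type type_regions)

-- ===== LEMMAS AND PROOFS =====

-- helper names for the proof: pvBkt g l is the bucket both programs build for geography g;
-- pvSt l is A's geo_groups state after processing l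
def pvBkt (g : String) (l : List (String × List (List (String × String)))) :
    PySem.Dict String (List (List (String × String))) :=
  l.foldl (fun d p => if map_region_to_geography p.1 == g then d.insert p.1 p.2 else d)
    (PySem.Dict.mk [])

def pvSt (l : List (String × List (List (String × String)))) :
    PySem.Dict String (PySem.Dict String (List (List (String × String)))) :=
  PySem.Dict.mk [("North America", pvBkt "North America" l), ("Europe", pvBkt "Europe" l),
                 ("Asia Pacific", pvBkt "Asia Pacific" l), ("South America", pvBkt "South America" l),
                 ("Other Regions", pvBkt "Other Regions" l)]

lemma slice3 (r : String) : (PySem.Str.slice r none (some 3)).toList = r.toList.take 3 := by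
  simp [pysem]

lemma pref_eq (r s : String) (hs : s.toList.length = 3) :
    (s == PySem.Str.slice r none (some 3)) = PySem.Str.startswith r s := by
  rw [Bool.eq_iff_iff, beq_iff_eq,
      PySem.Str.startswith, PySem.Chars.startswith_iff, List.prefix_iff_eq_take, hs]
  constructor
  · intro h; rw [h]; exact slice3 r
  · intro h
    have : s.toList = (PySem.Str.slice r none (some 3)).toList := by rw [slice3, h]
    exact String.toList_inj.mp this

lemma geo_eq (r : String) : geography_of r = map_region_to_geography r := by
  unfold geography_of map_region_to_geography pvPrefixToGeography
  rw [PySem.Dict.getD_eq_get?_getD]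
  simp only [PySem.Dict.get?_mk_cons,
    pref_eq r "us-" (by decide), pref_eq r "ca-" (by decide), pref_eq r "eu-" (by decide),
    pref_eq r "ap-" (by decide), pref_eq r "sa-" (by decide)]
  cases h1 : PySem.Str.startswith r "us-" <;> cases h2 : PySem.Str.startswith r "ca-" <;>
  cases h3 : PySem.Str.startswith r "eu-" <;> cases h4 : PySem.Str.startswith r "ap-" <;>
  cases h5 : PySem.Str.startswith r "sa-" <;> simp [PySem.Dict.get?]

lemma geo_cases (r : String) : map_region_to_geography r = "North America" ∨
    map_region_to_geography r = "Europe" ∨ map_region_to_geography r = "Asia Pacific" ∨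
    map_region_to_geography r = "South America" ∨ map_region_to_geography r = "Other Regions" := by
  unfold map_region_to_geography; split_ifs <;> simp

lemma bkt_append (g : String) (l : List (String × List (List (String × String)))) (p) :
    pvBkt g (l ++ [p]) =
      if map_region_to_geography p.1 == g then (pvBkt g l).insert p.1 p.2 else pvBkt g l := by
  simp [pvBkt, List.foldl_append]

lemma st_step (l : List (String × List (List (String × String)))) (p) :
    (pvSt l).modify (map_region_to_geography p.1) (PySem.Dict.mk [])
      (fun inner => inner.insert p.1 p.2) = pvSt (l ++ [p]) := by
  rcases geo_cases p.1 with h|h|h|h|h <;>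
    simp only [pvSt, PySem.Dict.modify, h, PySem.Dict.getD_eq_get?_getD,
      PySem.Dict.get?_mk_cons] <;>
    simp [PySem.Dict.insert, PySem.Dict.contains, bkt_append, h]

lemma fold_st (l : List (String × List (List (String × String)))) :
    l.foldl (fun g p => g.modify (map_region_to_geography p.1) (PySem.Dict.mk [])
      (fun inner => inner.insert p.1 p.2)) (pvSt []) = pvSt l := by
  induction l using List.reverseRecOn with
  | nil => rfl
  | append_singleton l p ih => rw [List.foldl_append, ih, List.foldl_cons, List.foldl_nil, st_step]

lemma bkt_eq (tr : List (String × List (List (String × String)))) (g : String) :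
    List.foldl (fun d p => if geography_of p.1 == g then d.insert p.1 p.2 else d)
      (PySem.Dict.mk []) tr = pvBkt g tr := by
  unfold pvBkt
  congr 1
  funext d p
  rw [geo_eq]

lemma a_eq_b (tr : List (String × List (List (String × String)))) :
    group_pricing_by_geography_for_type tr = group_pricing_by_geography_for_type_alt tr := by
  simp only [group_pricing_by_geography_for_type, group_pricing_by_geography_for_type_alt]
  rw [show (PySem.Dict.mk [("North America", PySem.Dict.mk []), ("Europe", PySem.Dict.mk []),
      ("Asia Pacific", PySem.Dict.mk []), ("South America", PySem.Dict.mk []),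
      ("Other Regions", PySem.Dict.mk [])] :
      PySem.Dict String (PySem.Dict String (List (List (String × String))))) = pvSt [] from rfl,
    fold_st]
  simp only [pvGeographies, List.foldl_cons, List.foldl_nil]
  rw [bkt_eq tr "North America", bkt_eq tr "Europe", bkt_eq tr "Asia Pacific",
      bkt_eq tr "South America", bkt_eq tr "Other Regions"]
  simp only [pvSt]
  cases e1 : (pvBkt "North America" tr).items.isEmpty <;>
  cases e2 : (pvBkt "Europe" tr).items.isEmpty <;>
  cases e3 : (pvBkt "Asia Pacific" tr).items.isEmpty <;>
  cases e4 : (pvBkt "South America" tr).items.isEmpty <;>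
  cases e5 : (pvBkt "Other Regions" tr).items.isEmpty <;>
  simp [List.filter, e1, e2, e3, e4, e5]


-- ===== VERDICT (by name: the statement is the Claim_ definition above) =====
theorem group_pricing_by_geography_for_type_spec : Claim_equal_group_pricing_by_geography_for_type := by
  intro tr _
  unfold Spec_group_pricing_by_geography_for_type
  exact a_eq_b tr
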